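-- pv_equiv track=rewrite | github.com/shunsuke-toba/kaggle-google-code-golf-2025 | arc_gen_common.py | create_linegrid
-- ===== SOURCE A (Python) =====
-- def create_linegrid(bitmap, spacing, linecolor):
--   """Creates a grid with lines and a bitmap.
--
--   Args:
--     bitmap: A 2D list of colors representing the bitmap.
--     spacing: The spacing between lines.
--     linecolor: The color of the lines.
--
--   Returns:
--     A 2D list representing the grid with lines and the bitmap.
--   """
--   actual_size = len(bitmap) * (spacing + 1) - 1
--   ingrid = grid(actual_size, actual_size, 0)
--   for r in range(actual_size):
--     for c in range(actual_size):
--       ingrid[r][c] = ingrid[r][c] if (r + 1) % (spacing + 1) != 0 else linecolor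
--       ingrid[r][c] = ingrid[r][c] if (c + 1) % (spacing + 1) != 0 else linecolor
--   for r, row in enumerate(bitmap):
--     for c, color in enumerate(row):
--       for dr in range(spacing):
--         for dc in range(spacing):
--           ingrid[r * (spacing + 1) + dr][c * (spacing + 1) + dc] = color
--   return ingrid
--
-- def grid(width, height, color=0):
--   return [[color for _ in range(width)] for _ in range(height)]
-- ===== SOURCE B (Python) =====
-- def create_linegrid(bitmap, spacing, linecolor):
--   actual_size = len(bitmap) * (spacing + 1) - 1
--   return [[linecolor if (r + 1) % (spacing + 1) == 0 or (c + 1) % (spacing + 1) == 0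
--            else bitmap[r // (spacing + 1)][c // (spacing + 1)]
--            for c in range(actual_size)]
--           for r in range(actual_size)]
-- ===== Notes on version B (the rewrite author's own statement) =====
-- stated objective: simpler
-- what changed: B replaces A's three passes (zero-init grid, double loop marking gridlines, quadruple loop copying each bitmap cell into its block) by a single nested comprehension that computes every cell directly from its coordinates: linecolor on gridline rows/columns, else bitmap[r//(spacing+1)][c//(spacing+1)].
-- outside the precondition, e.g. on create_linegrid([[1], [2, 3]], 1, 5): A returns [[1, 5, 0], [5, 5, 5], [2, 5, 3]], B raises IndexError
import Mathlib
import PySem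

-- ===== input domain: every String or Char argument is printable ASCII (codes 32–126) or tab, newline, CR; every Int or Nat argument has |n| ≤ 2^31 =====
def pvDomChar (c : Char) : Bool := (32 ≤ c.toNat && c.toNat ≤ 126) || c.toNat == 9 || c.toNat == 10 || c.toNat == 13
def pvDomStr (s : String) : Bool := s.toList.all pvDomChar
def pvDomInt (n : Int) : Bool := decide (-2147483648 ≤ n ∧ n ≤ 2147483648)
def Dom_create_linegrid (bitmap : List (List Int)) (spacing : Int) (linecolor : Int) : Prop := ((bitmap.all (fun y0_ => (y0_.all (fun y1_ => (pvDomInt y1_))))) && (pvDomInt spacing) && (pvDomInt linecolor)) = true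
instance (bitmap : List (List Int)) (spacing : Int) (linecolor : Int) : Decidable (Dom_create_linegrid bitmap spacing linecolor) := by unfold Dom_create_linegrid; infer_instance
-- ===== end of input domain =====

-- B replaces A's three passes (zero-init, gridline marking, block fill) by one coordinate-driven
-- nested comprehension; objective: simpler. Equivalence is claimed on Pre_ (spacing ≤ 0 or a
-- square bitmap); A does not mutate its arguments.

-- ===== PORT A =====
-- helper `grid(width, height, color)` of the Python module
def pvGrid (width height : Int) (color : Int) : List (List Int) :=
  (PySem.List.pyRange 0 height 1).map (fun _ => (PySem.List.pyRange 0 width 1).map (fun _ => color))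

-- `g[r][c] = v` : read the row, set the cell, write the row back.  Every index either program
-- ever uses is nonnegative and (inside Pre_) in range, where pySetD/pyGetD are exact.
def pvSet2d (g : List (List Int)) (r c : Int) (v : Int) : List (List Int) :=
  PySem.List.pySetD g r (PySem.List.pySetD (PySem.List.pyGetD g r []) c v)

-- `g[r][c]`
def pvGet2d (g : List (List Int)) (r c : Int) : Int :=
  PySem.List.pyGetD (PySem.List.pyGetD g r []) c 0

def create_linegrid (bitmap : List (List Int)) (spacing : Int) (linecolor : Int) : List (List Int) :=
  let actual_size : Int := (bitmap.length : Int) * (spacing + 1) - 1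
  let ingrid := pvGrid actual_size actual_size 0
  let ingrid := (PySem.List.pyRange 0 actual_size 1).foldl (fun g r =>
    (PySem.List.pyRange 0 actual_size 1).foldl (fun g c =>
      let g := pvSet2d g r c (if PySem.Int.mod (r + 1) (spacing + 1) ≠ 0 then pvGet2d g r c else linecolor)
      pvSet2d g r c (if PySem.Int.mod (c + 1) (spacing + 1) ≠ 0 then pvGet2d g r c else linecolor)) g) ingrid
  let ingrid := (PySem.List.enumerate bitmap).foldl (fun g rc =>
    (PySem.List.enumerate rc.2).foldl (fun g cc =>
      (PySem.List.pyRange 0 spacing 1).foldl (fun g dr =>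
        (PySem.List.pyRange 0 spacing 1).foldl (fun g dc =>
          pvSet2d g (rc.1 * (spacing + 1) + dr) (cc.1 * (spacing + 1) + dc) cc.2) g) g) g) ingrid
  ingrid

-- ===== PORT B =====
def create_linegrid_alt (bitmap : List (List Int)) (spacing : Int) (linecolor : Int) : List (List Int) :=
  let actual_size : Int := (bitmap.length : Int) * (spacing + 1) - 1
  (PySem.List.pyRange 0 actual_size 1).map (fun r =>
    (PySem.List.pyRange 0 actual_size 1).map (fun c =>
      if PySem.Int.mod (r + 1) (spacing + 1) = 0 ∨ PySem.Int.mod (c + 1) (spacing + 1) = 0 then linecolor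
      else pvGet2d bitmap (PySem.Int.floordiv r (spacing + 1)) (PySem.Int.floordiv c (spacing + 1))))

-- ===== PRECONDITION & SPEC =====
-- Pre_ excludes ragged bitmaps when spacing ≥ 1: there A either raises IndexError (a row longer
-- than the number of rows) or silently leaves zero blocks (a shorter row) — an artefact of its
-- block-fill pass — while B's natural indexing raises IndexError on the shorter rows.
def Pre_create_linegrid (bitmap : List (List Int)) (spacing : Int) (linecolor : Int) : Prop :=
  spacing ≤ 0 ∨ ∀ row ∈ bitmap, row.length = bitmap.length
instance (bitmap : List (List Int)) (spacing : Int) (linecolor : Int) : Decidable (Pre_create_linegrid bitmap spacing linecolor) := by unfold Pre_create_linegrid; infer_instance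

def pvWitness_create_linegrid : List (List Int) × Int × Int := ([[1, 2], [3, 4]], 1, 5)

def Spec_create_linegrid (bitmap : List (List Int)) (spacing : Int) (linecolor : Int) (out : List (List Int)) : Prop := out = create_linegrid_alt bitmap spacing linecolor
instance (bitmap : List (List Int)) (spacing : Int) (linecolor : Int) (out : List (List Int)) : Decidable (Spec_create_linegrid bitmap spacing linecolor out) := by unfold Spec_create_linegrid; infer_instance

-- ===== CLAIM (what is proved, stated in full; the proofs are below) =====
def Claim_equal_create_linegrid : Prop := ∀ (bitmap : List (List Int)) (spacing : Int) (linecolor : Int), Dom_create_linegrid bitmap spacing linecolor → Pre_create_linegrid bitmap spacing linecolor → Spec_create_linegrid bitmap spacing linecolor (create_linegrid bitmap spacing linecolor)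
-- ===== LEMMAS AND PROOFS =====

def gget (g : List (List Int)) (a b : Nat) : Int := (g[a]?.getD [])[b]?.getD 0
def gset (g : List (List Int)) (a b : Nat) (v : Int) : List (List Int) := g.set a ((g[a]?.getD []).set b v)
def Shape (g : List (List Int)) (N : Nat) : Prop := g.length = N ∧ ∀ row ∈ g, row.length = N

theorem getD_set' {α : Type} (l : List α) (i j : Nat) (a : α) (d : α) :
    (l.set i a)[j]?.getD d = if i = j ∧ i < l.length then a else l[j]?.getD d := by
  rw [List.getElem?_set]
  by_cases h1 : i = j
  · subst h1
    by_cases h2 : i < l.length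
    · simp [h2]
    · simp [h2, List.getElem?_eq_none (le_of_not_gt h2)]
  · simp [h1]

theorem row_len {g : List (List Int)} {N : Nat} (h : Shape g N) {a : Nat} (ha : a < N) :
    (g[a]?.getD []).length = N := by
  obtain ⟨hl, hrows⟩ := h
  rw [List.getElem?_eq_getElem (by omega)]
  exact hrows _ (List.getElem_mem _)

theorem shape_gset {g : List (List Int)} {N : Nat} (h : Shape g N) (a b : Nat) (ha : a < N) (v : Int) :
    Shape (gset g a b v) N := by
  refine ⟨by simp [gset, h.1], ?_⟩
  intro row hrow
  rcases List.mem_or_eq_of_mem_set hrow with hm | he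
  · exact h.2 row hm
  · subst he
    rw [List.length_set]
    exact row_len h ha

theorem gget_gset {g : List (List Int)} {N : Nat} (h : Shape g N) {a b : Nat} (ha : a < N) (hb : b < N) (v : Int)
    (a' b' : Nat) : gget (gset g a b v) a' b' = if a' = a ∧ b' = b then v else gget g a' b' := by
  have haL : a < g.length := by rw [h.1]; omega
  have hbL : b < (g[a]?.getD []).length := by rw [row_len h ha]; omega
  rw [gget, gset, getD_set']
  by_cases h1 : a = a'
  · subst h1
    rw [if_pos ⟨rfl, haL⟩, getD_set']
    by_cases h2 : b = b'
    · subst h2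
      simp [hbL]
    · have h2' : ¬(b' = b) := fun hh => h2 (hh.symm)
      simp [h2, h2', gget, hbL]
  · have h1' : ¬(a' = a) := fun hh => h1 (hh.symm)
    simp [h1, h1', gget]

theorem gset_gset {g : List (List Int)} {N : Nat} (h : Shape g N) {a : Nat} (b : Nat) (ha : a < N) (v1 v2 : Int) :
    gset (gset g a b v1) a b v2 = gset g a b v2 := by
  have haL : a < g.length := by rw [h.1]; omega
  rw [gset, gset, gset, getD_set']
  simp [haL, List.set_set]

def pvLineVal (m : Nat) (lc : Int) (r c : Nat) (v : Int) : Int :=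
  if (c + 1) % m = 0 then lc else if (r + 1) % m = 0 then lc else v

theorem phase2_inner (m N : Nat) (lc : Int) (r : Nat) (hr : r < N) :
    ∀ (k : Nat), k ≤ N → ∀ g, Shape g N →
    Shape ((List.range k).foldl (fun g c => gset g r c (pvLineVal m lc r c (gget g r c))) g) N ∧
    ∀ a b, a < N → b < N →
      gget ((List.range k).foldl (fun g c => gset g r c (pvLineVal m lc r c (gget g r c))) g) a b =
        if a = r ∧ b < k then pvLineVal m lc a b (gget g a b) else gget g a b := by
  intro k
  induction k with
  | zero => intro _ g hg; refine ⟨by simpa using hg, ?_⟩; intro a b _ _; simp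
  | succ k ih =>
    intro hk g hg
    obtain ⟨ihS, ihG⟩ := ih (by omega) g hg
    rw [List.range_succ, List.foldl_append, List.foldl_cons, List.foldl_nil]
    have hkN : k < N := by omega
    refine ⟨shape_gset ihS r k hr _, ?_⟩
    intro a b haN hbN
    rw [gget_gset ihS hr hkN, ihG r k hr hkN, ihG a b haN hbN]
    by_cases h1 : a = r
    · subst h1
      by_cases h2 : b = k
      · subst h2; simp
      · by_cases h3 : b < k
        · simp [h2, h3, Nat.lt_succ_of_lt h3]
        · simp [h2, h3, show ¬ b < k + 1 by omega]
    · simp [h1]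

theorem phase2_outer (m N : Nat) (lc : Int) :
    ∀ (j : Nat), j ≤ N → ∀ g, Shape g N →
    Shape ((List.range j).foldl (fun g r => (List.range N).foldl (fun g c => gset g r c (pvLineVal m lc r c (gget g r c))) g) g) N ∧
    ∀ a b, a < N → b < N →
      gget ((List.range j).foldl (fun g r => (List.range N).foldl (fun g c => gset g r c (pvLineVal m lc r c (gget g r c))) g) g) a b =
        if a < j then pvLineVal m lc a b (gget g a b) else gget g a b := by
  intro j
  induction j with
  | zero => intro _ g hg; refine ⟨by simpa using hg, ?_⟩; intro a b _ _; simp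
  | succ j ih =>
    intro hj g hg
    obtain ⟨ihS, ihG⟩ := ih (by omega) g hg
    rw [List.range_succ, List.foldl_append, List.foldl_cons, List.foldl_nil]
    have hjN : j < N := by omega
    obtain ⟨innS, innG⟩ := phase2_inner m N lc j hjN N (le_refl N) _ ihS
    refine ⟨innS, ?_⟩
    intro a b haN hbN
    rw [innG a b haN hbN, ihG a b haN hbN]
    by_cases h1 : a = j
    · subst h1; simp [hbN, show ¬ a < a by omega, show a < a + 1 by omega]
    · by_cases h2 : a < j
      · simp [h1, h2, show a < j + 1 by omega]
      · simp [h1, h2, show ¬ a < j + 1 by omega]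

theorem dcLoop (N : Nat) (v : Int) (R C : Nat) (hR : R < N) :
    ∀ (k : Nat), C + k ≤ N → ∀ g, Shape g N →
    Shape ((List.range k).foldl (fun g dc => gset g R (C + dc) v) g) N ∧
    ∀ a b, a < N → b < N →
      gget ((List.range k).foldl (fun g dc => gset g R (C + dc) v) g) a b =
        if a = R ∧ C ≤ b ∧ b < C + k then v else gget g a b := by
  intro k
  induction k with
  | zero => intro _ g hg; refine ⟨by simpa using hg, ?_⟩; intro a b _ _; simp [show ¬ (C ≤ b ∧ b < C + 0) by omega]
  | succ k ih =>
    intro hk g hg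
    obtain ⟨ihS, ihG⟩ := ih (by omega) g hg
    rw [List.range_succ, List.foldl_append, List.foldl_cons, List.foldl_nil]
    refine ⟨shape_gset ihS R (C + k) hR _, ?_⟩
    intro a b haN hbN
    rw [gget_gset ihS hR (by omega) v, ihG a b haN hbN]
    by_cases h1 : a = R
    · subst h1
      by_cases h2 : b = C + k
      · subst h2; simp [show C ≤ C + k by omega, show C + k < C + (k+1) by omega]
      · by_cases h3 : C ≤ b ∧ b < C + k
        · simp [h2, h3, show C ≤ b ∧ b < C + (k+1) by omega]
        · simp [h2, h3, show ¬ (C ≤ b ∧ b < C + (k+1)) by omega]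
    · simp [h1]

theorem drLoop (N : Nat) (v : Int) (A0 B0 sN : Nat) (hB : B0 + sN ≤ N) :
    ∀ (k : Nat), A0 + k ≤ N → ∀ g, Shape g N →
    Shape ((List.range k).foldl (fun g dr => (List.range sN).foldl (fun g dc => gset g (A0 + dr) (B0 + dc) v) g) g) N ∧
    ∀ a b, a < N → b < N →
      gget ((List.range k).foldl (fun g dr => (List.range sN).foldl (fun g dc => gset g (A0 + dr) (B0 + dc) v) g) g) a b =
        if (A0 ≤ a ∧ a < A0 + k) ∧ B0 ≤ b ∧ b < B0 + sN then v else gget g a b := by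
  intro k
  induction k with
  | zero => intro _ g hg; refine ⟨by simpa using hg, ?_⟩; intro a b _ _; simp [show ¬ ((A0 ≤ a ∧ a < A0 + 0) ∧ B0 ≤ b ∧ b < B0 + sN) by omega]
  | succ k ih =>
    intro hk g hg
    obtain ⟨ihS, ihG⟩ := ih (by omega) g hg
    rw [List.range_succ, List.foldl_append, List.foldl_cons, List.foldl_nil]
    obtain ⟨dS, dG⟩ := dcLoop N v (A0 + k) B0 (by omega) sN (by omega) _ ihS
    refine ⟨dS, ?_⟩
    intro a b haN hbN
    rw [dG a b haN hbN, ihG a b haN hbN]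
    by_cases h1 : a = A0 + k
    · subst h1
      by_cases h2 : B0 ≤ b ∧ b < B0 + sN
      · simp [h2, show A0 ≤ A0 + k by omega, show A0 + k < A0 + (k+1) by omega]
      · simp [h2]
    · by_cases h2 : A0 ≤ a ∧ a < A0 + k
      · simp [h1, h2, show A0 ≤ a ∧ a < A0 + (k+1) from ⟨h2.1, by omega⟩]
      · simp [h1, h2, show ¬ (A0 ≤ a ∧ a < A0 + (k+1)) by omega]

theorem pvSet2d_cast (g : List (List Int)) (a b : Nat) (v : Int) :
    pvSet2d g (a : Int) (b : Int) v = gset g a b v := by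
  simp [pvSet2d, gset, List.getD_eq_getElem?_getD]

theorem pvGet2d_cast (g : List (List Int)) (a b : Nat) :
    pvGet2d g (a : Int) (b : Int) = gget g a b := by
  simp [pvGet2d, gget, List.getD_eq_getElem?_getD]

theorem pyBlock_cast (sN R0 B0 : Nat) (x : Int) (g : List (List Int)) :
    (PySem.List.pyRange 0 (sN : Int) 1).foldl (fun g dr =>
      (PySem.List.pyRange 0 (sN : Int) 1).foldl (fun g dc =>
        pvSet2d g ((R0 : Int) + dr) ((B0 : Int) + dc) x) g) g
    = (List.range sN).foldl (fun g dr => (List.range sN).foldl (fun g dc => gset g (R0 + dr) (B0 + dc) x) g) g := by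
  rw [PySem.List.pyRange_zero_nat, List.foldl_map]
  apply PySem.List.foldl_congr_mem
  intro g dr _
  rw [List.foldl_map]
  apply PySem.List.foldl_congr_mem
  intro g dc _
  rw [show ((R0 : Int) + (dr : Int)) = ((R0 + dr : Nat) : Int) by push_cast; ring,
    show ((B0 : Int) + (dc : Int)) = ((B0 + dc : Nat) : Int) by push_cast; ring, pvSet2d_cast]

theorem ccLoop (N sN R0 : Nat) (hR0 : R0 + sN ≤ N) :
    ∀ (row : List Int) (i0 : Nat), (i0 + row.length) * (sN + 1) ≤ N + 1 → ∀ g, Shape g N →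
    Shape ((PySem.List.enumerate row (i0 : Int)).foldl (fun g cc =>
        (PySem.List.pyRange 0 (sN : Int) 1).foldl (fun g dr =>
          (PySem.List.pyRange 0 (sN : Int) 1).foldl (fun g dc =>
            pvSet2d g ((R0 : Int) + dr) (cc.1 * ((sN : Int) + 1) + dc) cc.2) g) g) g) N ∧
    ∀ a b, a < N → b < N →
      gget ((PySem.List.enumerate row (i0 : Int)).foldl (fun g cc =>
        (PySem.List.pyRange 0 (sN : Int) 1).foldl (fun g dr =>
          (PySem.List.pyRange 0 (sN : Int) 1).foldl (fun g dc =>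
            pvSet2d g ((R0 : Int) + dr) (cc.1 * ((sN : Int) + 1) + dc) cc.2) g) g) g) a b =
        if (R0 ≤ a ∧ a < R0 + sN) ∧ i0 * (sN + 1) ≤ b ∧ b < (i0 + row.length) * (sN + 1) ∧ b % (sN + 1) < sN
        then row.getD (b / (sN + 1) - i0) 0 else gget g a b := by
  intro row
  induction row with
  | nil =>
    intro i0 _ g hg
    refine ⟨by simpa [PySem.List.enumerate] using hg, ?_⟩
    intro a b _ _
    have hz : (i0 + ([] : List Int).length) * (sN + 1) = i0 * (sN + 1) := by simp
    rw [PySem.List.enumerate_nil, List.foldl_nil, if_neg (by rw [hz]; intro h; omega)]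
  | cons x rest ih =>
    intro i0 hlen g hg
    rw [PySem.List.enumerate_cons, List.foldl_cons]
    have hcast : ((i0 : Int) * ((sN : Int) + 1)) = ((i0 * (sN + 1) : Nat) : Int) := by push_cast; ring
    have hstep :
        ((PySem.List.pyRange 0 (sN : Int) 1).foldl (fun g dr =>
          (PySem.List.pyRange 0 (sN : Int) 1).foldl (fun g dc =>
            pvSet2d g ((R0 : Int) + dr) (((i0 : Int), x).1 * ((sN : Int) + 1) + dc) ((i0 : Int), x).2) g) g)
        = (List.range sN).foldl (fun g dr => (List.range sN).foldl (fun g dc => gset g (R0 + dr) (i0 * (sN + 1) + dc) x) g) g := by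
      simp only [hcast]
      exact pyBlock_cast sN R0 (i0 * (sN + 1)) x g
    rw [hstep]
    have hmul : (i0 + (x :: rest).length) * (sN + 1) = i0 * (sN+1) + (sN+1) + rest.length * (sN+1) := by
      simp [List.length_cons]; ring
    have hB : i0 * (sN + 1) + sN ≤ N := by omega
    obtain ⟨dS, dG⟩ := drLoop N x R0 (i0 * (sN + 1)) sN hB sN (by omega) g hg
    have hlen' : (i0 + 1 + rest.length) * (sN + 1) ≤ N + 1 := by
      have : (i0 + 1 + rest.length) * (sN + 1) = (i0 + (x :: rest).length) * (sN + 1) := by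
        simp [List.length_cons]; ring
      omega
    obtain ⟨ihS, ihG⟩ := ih (i0 + 1) hlen' _ dS
    rw [show ((i0 : Int) + 1) = ((i0 + 1 : Nat) : Int) by push_cast; ring]
    refine ⟨ihS, ?_⟩
    intro a b haN hbN
    rw [ihG a b haN hbN, dG a b haN hbN]
    have e1 : (i0 + 1) * (sN + 1) = i0 * (sN + 1) + (sN + 1) := by ring
    have e2 : (i0 + 1 + rest.length) * (sN + 1) = i0 * (sN + 1) + (sN + 1) + rest.length * (sN + 1) := by ring
    have hdm := Nat.div_add_mod b (sN + 1)
    have hml : b % (sN + 1) < sN + 1 := Nat.mod_lt _ (by omega)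
    by_cases hA : R0 ≤ a ∧ a < R0 + sN
    · by_cases hb1 : (i0 + 1) * (sN + 1) ≤ b
      · have hnblk : ¬ (i0 * (sN + 1) ≤ b ∧ b < i0 * (sN + 1) + sN) := by omega
        have hq : i0 + 1 ≤ b / (sN + 1) := (Nat.le_div_iff_mul_le (by omega)).mpr (by omega)
        by_cases hb2 : b < (i0 + 1 + rest.length) * (sN + 1) ∧ b % (sN + 1) < sN
        · have hidx : b / (sN + 1) - i0 = (b / (sN + 1) - (i0 + 1)) + 1 := by omega
          simp only [if_pos (show (R0 ≤ a ∧ a < R0 + sN) ∧ (i0+1) * (sN+1) ≤ b ∧ b < (i0+1+rest.length) * (sN+1) ∧ b % (sN+1) < sN from ⟨hA, hb1, hb2.1, hb2.2⟩),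
            if_pos (show (R0 ≤ a ∧ a < R0 + sN) ∧ i0 * (sN+1) ≤ b ∧ b < (i0 + (x :: rest).length) * (sN+1) ∧ b % (sN+1) < sN from ⟨hA, by omega, by omega, hb2.2⟩)]
          rw [hidx, List.getD_cons_succ]
        · have hn1 : ¬ ((R0 ≤ a ∧ a < R0 + sN) ∧ (i0+1) * (sN+1) ≤ b ∧ b < (i0+1+rest.length) * (sN+1) ∧ b % (sN+1) < sN) := by
            intro h; exact hb2 ⟨h.2.2.1, h.2.2.2⟩
          have hn2 : ¬ ((R0 ≤ a ∧ a < R0 + sN) ∧ i0 * (sN+1) ≤ b ∧ b < (i0 + (x :: rest).length) * (sN+1) ∧ b % (sN+1) < sN) := by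
            intro h; exact hb2 ⟨by omega, h.2.2.2⟩
          rw [if_neg hn1, if_neg (by intro h; exact hnblk ⟨h.2.1, h.2.2⟩), if_neg hn2]
      · have hn1 : ¬ ((R0 ≤ a ∧ a < R0 + sN) ∧ (i0+1) * (sN+1) ≤ b ∧ b < (i0+1+rest.length) * (sN+1) ∧ b % (sN+1) < sN) := by
          intro h; exact hb1 h.2.1
        rw [if_neg hn1]
        by_cases hb0 : i0 * (sN + 1) ≤ b
        · have hdiv : b / (sN + 1) = i0 := Nat.div_eq_of_lt_le hb0 (by omega)
          have hmod : (sN + 1) * i0 + b % (sN + 1) = b := by rw [← hdiv]; exact hdm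
          have hmul2 : (sN + 1) * i0 = i0 * (sN + 1) := by ring
          rw [hmul2] at hmod
          by_cases hbm : b % (sN + 1) < sN
          · rw [if_pos ⟨hA, by omega⟩,
              if_pos (show (R0 ≤ a ∧ a < R0 + sN) ∧ i0 * (sN+1) ≤ b ∧ b < (i0 + (x :: rest).length) * (sN+1) ∧ b % (sN+1) < sN from ⟨hA, hb0, by omega, hbm⟩)]
            rw [hdiv]
            simp
          · rw [if_neg (by intro h; omega), if_neg (by intro h; exact hbm h.2.2.2)]
        · rw [if_neg (by intro h; exact hb0 h.2.1), if_neg (by intro h; exact hb0 h.2.1)]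
    · rw [if_neg (by intro h; exact hA h.1), if_neg (by intro h; exact hA h.1), if_neg (by intro h; exact hA h.1)]

theorem rrLoop (N sN nfull : Nat) (hcol : nfull * (sN + 1) ≤ N + 1) :
    ∀ (bm : List (List Int)) (r0 : Nat), (∀ row ∈ bm, row.length = nfull) →
      (r0 + bm.length) * (sN + 1) ≤ N + 1 → ∀ g, Shape g N →
    Shape ((PySem.List.enumerate bm (r0 : Int)).foldl (fun g rc =>
        (PySem.List.enumerate rc.2).foldl (fun g cc =>
          (PySem.List.pyRange 0 (sN : Int) 1).foldl (fun g dr =>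
            (PySem.List.pyRange 0 (sN : Int) 1).foldl (fun g dc =>
              pvSet2d g (rc.1 * ((sN : Int) + 1) + dr) (cc.1 * ((sN : Int) + 1) + dc) cc.2) g) g) g) g) N ∧
    ∀ a b, a < N → b < N →
      gget ((PySem.List.enumerate bm (r0 : Int)).foldl (fun g rc =>
        (PySem.List.enumerate rc.2).foldl (fun g cc =>
          (PySem.List.pyRange 0 (sN : Int) 1).foldl (fun g dr =>
            (PySem.List.pyRange 0 (sN : Int) 1).foldl (fun g dc =>
              pvSet2d g (rc.1 * ((sN : Int) + 1) + dr) (cc.1 * ((sN : Int) + 1) + dc) cc.2) g) g) g) g) a b =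
        if (r0 * (sN + 1) ≤ a ∧ a < (r0 + bm.length) * (sN + 1) ∧ a % (sN + 1) < sN) ∧ b < nfull * (sN + 1) ∧ b % (sN + 1) < sN
        then gget bm (a / (sN + 1) - r0) (b / (sN + 1)) else gget g a b := by
  intro bm
  induction bm with
  | nil =>
    intro r0 _ _ g hg
    refine ⟨by simpa [PySem.List.enumerate_nil] using hg, ?_⟩
    intro a b _ _
    have hz : (r0 + ([] : List (List Int)).length) * (sN + 1) = r0 * (sN + 1) := by simp
    rw [PySem.List.enumerate_nil, List.foldl_nil, if_neg (by rw [hz]; intro h; omega)]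
  | cons x rest ih =>
    intro r0 hrows hlen g hg
    rw [PySem.List.enumerate_cons, List.foldl_cons]
    have hxlen : x.length = nfull := hrows x List.mem_cons_self
    have hmul : (r0 + (x :: rest).length) * (sN + 1) = r0 * (sN + 1) + (sN + 1) + rest.length * (sN + 1) := by
      simp [List.length_cons]; ring
    have hcast : ((r0 : Int) * ((sN : Int) + 1)) = ((r0 * (sN + 1) : Nat) : Int) := by push_cast; ring
    have hstep :
        ((PySem.List.enumerate ((((r0 : Int), x) : Int × List Int).2)).foldl (fun g cc =>
          (PySem.List.pyRange 0 (sN : Int) 1).foldl (fun g dr =>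
            (PySem.List.pyRange 0 (sN : Int) 1).foldl (fun g dc =>
              pvSet2d g ((((r0 : Int), x) : Int × List Int).1 * ((sN : Int) + 1) + dr) (cc.1 * ((sN : Int) + 1) + dc) cc.2) g) g) g)
        = (PySem.List.enumerate x ((0 : Nat) : Int)).foldl (fun g cc =>
          (PySem.List.pyRange 0 (sN : Int) 1).foldl (fun g dr =>
            (PySem.List.pyRange 0 (sN : Int) 1).foldl (fun g dc =>
              pvSet2d g (((r0 * (sN + 1) : Nat) : Int) + dr) (cc.1 * ((sN : Int) + 1) + dc) cc.2) g) g) g := by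
      simp only [hcast, Nat.cast_zero]
    rw [hstep]
    obtain ⟨cS, cG⟩ := ccLoop N sN (r0 * (sN + 1)) (by omega) x 0
      (by rw [Nat.zero_add, hxlen]; omega) g hg
    obtain ⟨ihS, ihG⟩ := ih (r0 + 1) (fun row hr => hrows row (List.mem_cons_of_mem _ hr))
      (by have : (r0 + 1 + rest.length) * (sN + 1) = (r0 + (x :: rest).length) * (sN + 1) := by simp [List.length_cons]; ring
          omega) _ cS
    rw [show ((r0 : Int) + 1) = ((r0 + 1 : Nat) : Int) by push_cast; ring]
    refine ⟨ihS, ?_⟩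
    intro a b haN hbN
    rw [ihG a b haN hbN, cG a b haN hbN]
    have e1 : (r0 + 1) * (sN + 1) = r0 * (sN + 1) + (sN + 1) := by ring
    have e2 : (r0 + 1 + rest.length) * (sN + 1) = r0 * (sN + 1) + (sN + 1) + rest.length * (sN + 1) := by ring
    have hdm := Nat.div_add_mod a (sN + 1)
    have hml : a % (sN + 1) < sN + 1 := Nat.mod_lt _ (by omega)
    by_cases hB : b < nfull * (sN + 1) ∧ b % (sN + 1) < sN
    · by_cases ha1 : (r0 + 1) * (sN + 1) ≤ a
      · have hnblk : ¬ (r0 * (sN + 1) ≤ a ∧ a < r0 * (sN + 1) + sN) := by omega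
        have hq : r0 + 1 ≤ a / (sN + 1) := (Nat.le_div_iff_mul_le (by omega)).mpr (by omega)
        by_cases ha2 : a < (r0 + 1 + rest.length) * (sN + 1) ∧ a % (sN + 1) < sN
        · have hidx : a / (sN + 1) - r0 = (a / (sN + 1) - (r0 + 1)) + 1 := by omega
          rw [if_pos ⟨⟨ha1, ha2.1, ha2.2⟩, hB⟩,
            if_pos (show (r0 * (sN+1) ≤ a ∧ a < (r0 + (x :: rest).length) * (sN+1) ∧ a % (sN+1) < sN) ∧ b < nfull * (sN+1) ∧ b % (sN+1) < sN from ⟨⟨by omega, by omega, ha2.2⟩, hB⟩)]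
          rw [hidx]
          simp [gget]
        · rw [if_neg (by intro h; exact ha2 ⟨h.1.2.1, h.1.2.2⟩),
            if_neg (by intro h; exact hnblk ⟨h.1.1, by omega⟩),
            if_neg (by intro h; exact ha2 ⟨by omega, h.1.2.2⟩)]
      · rw [if_neg (by intro h; exact ha1 h.1.1)]
        by_cases ha0 : r0 * (sN + 1) ≤ a
        · have hdiv : a / (sN + 1) = r0 := Nat.div_eq_of_lt_le ha0 (by omega)
          have hmod : (sN + 1) * r0 + a % (sN + 1) = a := by rw [← hdiv]; exact hdm
          have hmul2 : (sN + 1) * r0 = r0 * (sN + 1) := by ring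
          rw [hmul2] at hmod
          by_cases ham : a % (sN + 1) < sN
          · rw [if_pos (show (r0 * (sN+1) ≤ a ∧ a < r0 * (sN+1) + sN) ∧ 0 * (sN+1) ≤ b ∧ b < (0 + x.length) * (sN+1) ∧ b % (sN+1) < sN from ⟨⟨ha0, by omega⟩, by omega, by rw [Nat.zero_add, hxlen]; exact hB.1, hB.2⟩),
              if_pos (show (r0 * (sN+1) ≤ a ∧ a < (r0 + (x :: rest).length) * (sN+1) ∧ a % (sN+1) < sN) ∧ b < nfull * (sN+1) ∧ b % (sN+1) < sN from ⟨⟨ha0, by omega, ham⟩, hB⟩)]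
            rw [hdiv]
            simp [gget, List.getD_eq_getElem?_getD]
          · rw [if_neg (by intro h; omega), if_neg (by intro h; exact ham h.1.2.2)]
        · rw [if_neg (by intro h; exact ha0 h.1.1), if_neg (by intro h; exact ha0 h.1.1)]
    · rw [if_neg (by intro h; exact hB h.2), if_neg (by intro h; exact hB ⟨by rw [Nat.zero_add, hxlen] at h; exact h.2.2.1, h.2.2.2⟩), if_neg (by intro h; exact hB h.2)]

theorem mod_succ_iff (a sN : Nat) : (a + 1) % (sN + 1) = 0 ↔ a % (sN + 1) = sN := by
  constructor
  · intro h
    obtain ⟨k, hk⟩ := Nat.dvd_of_mod_eq_zero h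
    match k, hk with
    | 0, hk => omega
    | k + 1, hk =>
      have ha : a = sN + (sN + 1) * k := by
        have : (sN + 1) * (k + 1) = (sN + 1) * k + sN + 1 := by ring
        omega
      rw [ha, Nat.add_mul_mod_self_left, Nat.mod_eq_of_lt (by omega)]
  · intro h
    have hd := Nat.div_add_mod a (sN + 1)
    have : a + 1 = (sN + 1) * (a / (sN + 1) + 1) := by
      have : (sN + 1) * (a / (sN + 1) + 1) = (sN + 1) * (a / (sN + 1)) + sN + 1 := by ring
      omega
    rw [this, Nat.mul_mod_right]

theorem grid_eq_of_gget {G1 G2 : List (List Int)} {N : Nat} (h1 : Shape G1 N) (h2 : Shape G2 N)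
    (h : ∀ a b, a < N → b < N → gget G1 a b = gget G2 a b) : G1 = G2 := by
  obtain ⟨l1, r1⟩ := h1
  obtain ⟨l2, r2⟩ := h2
  apply List.ext_getElem (by omega)
  intro a ha1 ha2
  have haN : a < N := by omega
  have hr1 : G1[a].length = N := r1 _ (List.getElem_mem _)
  have hr2 : G2[a].length = N := r2 _ (List.getElem_mem _)
  apply List.ext_getElem (by omega)
  intro b hb1 hb2
  have hbN : b < N := by omega
  have := h a b haN hbN
  rw [gget, gget, List.getElem?_eq_getElem ha1, List.getElem?_eq_getElem ha2] at this
  simpa [List.getElem?_eq_getElem hb1, List.getElem?_eq_getElem hb2] using this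

theorem pvGrid_shape (N : Nat) : Shape (pvGrid (N : Int) (N : Int) 0) N := by
  constructor
  · simp [pvGrid, PySem.List.length_pyRange_one]
  · intro row hrow
    simp only [pvGrid, List.mem_map] at hrow
    obtain ⟨_, _, hr⟩ := hrow
    simp [← hr, PySem.List.length_pyRange_one]

theorem pvGrid_gget (N : Nat) (a b : Nat) : gget (pvGrid (N : Int) (N : Int) 0) a b = 0 := by
  simp only [pvGrid, PySem.List.pyRange_zero_nat, List.map_map, gget, List.getElem?_map]
  rcases (List.range N)[a]? with _ | k
  · simp
  · simp only [Option.map_some, Option.getD_some, Function.comp]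
    rw [List.getElem?_map]
    rcases (List.range N)[b]? with _ | j <;> simp

theorem body_eq (sN N : Nat) (lc : Int) {g : List (List Int)} (hg : Shape g N) {r c : Nat}
    (hr : r < N) (hc : c < N) :
    pvSet2d (pvSet2d g (r : Int) (c : Int) (if PySem.Int.mod ((r : Int) + 1) ((sN : Int) + 1) ≠ 0 then pvGet2d g (r : Int) (c : Int) else lc)) (r : Int) (c : Int)
      (if PySem.Int.mod ((c : Int) + 1) ((sN : Int) + 1) ≠ 0 then pvGet2d (pvSet2d g (r : Int) (c : Int) (if PySem.Int.mod ((r : Int) + 1) ((sN : Int) + 1) ≠ 0 then pvGet2d g (r : Int) (c : Int) else lc)) (r : Int) (c : Int) else lc)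
    = gset g r c (pvLineVal (sN + 1) lc r c (gget g r c)) := by
  have hcr : ((r : Int) + 1) = ((r + 1 : Nat) : Int) := by push_cast; ring
  have hcc : ((c : Int) + 1) = ((c + 1 : Nat) : Int) := by push_cast; ring
  have hcm : ((sN : Int) + 1) = ((sN + 1 : Nat) : Int) := by push_cast; ring
  rw [hcr, hcc, hcm, PySem.Int.mod_natCast, PySem.Int.mod_natCast]
  simp only [pvSet2d_cast, pvGet2d_cast]
  rw [gget_gset hg hr hc]
  simp only [and_self, if_pos rfl, gset_gset hg c hr]
  congr 1
  by_cases h2 : (c + 1) % (sN + 1) = 0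
  · simp [pvLineVal, h2]
  · by_cases h1 : (r + 1) % (sN + 1) = 0
    · simp [pvLineVal, h1, h2, Nat.cast_eq_zero]
    · have d2 : (((c + 1) % (sN + 1) : Nat) : Int) ≠ 0 := by exact_mod_cast h2
      have d1 : (((r + 1) % (sN + 1) : Nat) : Int) ≠ 0 := by exact_mod_cast h1
      rw [pvLineVal, if_pos d2, if_pos d1, if_neg h2, if_neg h1]
      simp

theorem phase2InnerInt (sN N : Nat) (lc : Int) (r : Nat) (hr : r < N) :
    ∀ (k : Nat), k ≤ N → ∀ g, Shape g N →
    (PySem.List.pyRange 0 (k : Int) 1).foldl (fun g c =>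
        pvSet2d (pvSet2d g (r : Int) c (if PySem.Int.mod ((r : Int) + 1) ((sN : Int) + 1) ≠ 0 then pvGet2d g (r : Int) c else lc)) (r : Int) c
          (if PySem.Int.mod (c + 1) ((sN : Int) + 1) ≠ 0 then pvGet2d (pvSet2d g (r : Int) c (if PySem.Int.mod ((r : Int) + 1) ((sN : Int) + 1) ≠ 0 then pvGet2d g (r : Int) c else lc)) (r : Int) c else lc)) g
    = (List.range k).foldl (fun g c => gset g r c (pvLineVal (sN + 1) lc r c (gget g r c))) g := by
  intro k
  induction k with
  | zero => intro _ g _; simp [PySem.List.pyRange_one_eq_nil]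
  | succ k ih =>
    intro hk g hg
    rw [show ((k + 1 : Nat) : Int) = (k : Int) + 1 by push_cast; ring,
      PySem.List.pyRange_one_succ_right (by positivity), List.foldl_append, List.foldl_cons, List.foldl_nil,
      List.range_succ, List.foldl_append, List.foldl_cons, List.foldl_nil, ih (by omega) g hg]
    exact body_eq sN N lc (phase2_inner (sN + 1) N lc r hr k (by omega) g hg).1 hr (by omega)

theorem phase2Int (sN N : Nat) (lc : Int) :
    ∀ (j : Nat), j ≤ N → ∀ g, Shape g N →
    (PySem.List.pyRange 0 (j : Int) 1).foldl (fun g r =>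
      (PySem.List.pyRange 0 (N : Int) 1).foldl (fun g c =>
        pvSet2d (pvSet2d g r c (if PySem.Int.mod (r + 1) ((sN : Int) + 1) ≠ 0 then pvGet2d g r c else lc)) r c
          (if PySem.Int.mod (c + 1) ((sN : Int) + 1) ≠ 0 then pvGet2d (pvSet2d g r c (if PySem.Int.mod (r + 1) ((sN : Int) + 1) ≠ 0 then pvGet2d g r c else lc)) r c else lc)) g) g
    = (List.range j).foldl (fun g r => (List.range N).foldl (fun g c => gset g r c (pvLineVal (sN + 1) lc r c (gget g r c))) g) g := by
  intro j
  induction j with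
  | zero => intro _ g _; simp [PySem.List.pyRange_one_eq_nil]
  | succ j ih =>
    intro hj g hg
    rw [show ((j + 1 : Nat) : Int) = (j : Int) + 1 by push_cast; ring,
      PySem.List.pyRange_one_succ_right (by positivity), List.foldl_append, List.foldl_cons, List.foldl_nil,
      List.range_succ, List.foldl_append, List.foldl_cons, List.foldl_nil, ih (by omega) g hg]
    exact phase2InnerInt sN N lc j (by omega) N (le_refl N) _ (phase2_outer (sN + 1) N lc j (by omega) g hg).1

theorem altB (N sN : Nat) (lc : Int) (bitmap : List (List Int)) :
    Shape ((PySem.List.pyRange 0 (N : Int) 1).map (fun r =>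
      (PySem.List.pyRange 0 (N : Int) 1).map (fun c =>
        if PySem.Int.mod (r + 1) ((sN : Int) + 1) = 0 ∨ PySem.Int.mod (c + 1) ((sN : Int) + 1) = 0 then lc
        else pvGet2d bitmap (PySem.Int.floordiv r ((sN : Int) + 1)) (PySem.Int.floordiv c ((sN : Int) + 1))))) N ∧
    ∀ a b, a < N → b < N →
      gget ((PySem.List.pyRange 0 (N : Int) 1).map (fun r =>
        (PySem.List.pyRange 0 (N : Int) 1).map (fun c =>
          if PySem.Int.mod (r + 1) ((sN : Int) + 1) = 0 ∨ PySem.Int.mod (c + 1) ((sN : Int) + 1) = 0 then lc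
          else pvGet2d bitmap (PySem.Int.floordiv r ((sN : Int) + 1)) (PySem.Int.floordiv c ((sN : Int) + 1))))) a b =
        if (a + 1) % (sN + 1) = 0 ∨ (b + 1) % (sN + 1) = 0 then lc
        else gget bitmap (a / (sN + 1)) (b / (sN + 1)) := by
  rw [PySem.List.pyRange_zero_nat, List.map_map]
  constructor
  · constructor
    · simp
    · intro row hrow
      simp only [List.mem_map] at hrow
      obtain ⟨_, _, hr⟩ := hrow
      simp [← hr]
  · intro a b haN hbN
    rw [gget, List.getElem?_map, List.getElem?_range haN]
    simp only [Option.map_some, Option.getD_some, Function.comp]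
    rw [List.map_map, List.getElem?_map, List.getElem?_range hbN]
    simp only [Option.map_some, Option.getD_some, Function.comp]
    have hca : ((a : Int) + 1) = ((a + 1 : Nat) : Int) := by push_cast; ring
    have hcb : ((b : Int) + 1) = ((b + 1 : Nat) : Int) := by push_cast; ring
    have hcm : ((sN : Int) + 1) = ((sN + 1 : Nat) : Int) := by push_cast; ring
    rw [hca, hcb, hcm, PySem.Int.mod_natCast, PySem.Int.mod_natCast,
      PySem.Int.floordiv_natCast, PySem.Int.floordiv_natCast, pvGet2d_cast]
    by_cases h : (a + 1) % (sN + 1) = 0 ∨ (b + 1) % (sN + 1) = 0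
    · rw [if_pos (by rcases h with h | h; exact Or.inl (by exact_mod_cast h); exact Or.inr (by exact_mod_cast h)), if_pos h]
    · push_neg at h
      rw [if_neg (by push_neg; exact ⟨by exact_mod_cast h.1, by exact_mod_cast h.2⟩), if_neg (by push_neg; exact h)]

-- ===== VERDICT (by name: the statement is the Claim_ definition above) =====
theorem create_linegrid_spec : Claim_equal_create_linegrid := by
  intro bitmap spacing linecolor _ hpre
  unfold Spec_create_linegrid create_linegrid create_linegrid_alt
  dsimp only []
  by_cases hnil : bitmap = []
  · subst hnil
    rw [PySem.List.enumerate_nil, List.foldl_nil,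
      show ((([] : List (List Int)).length : Int) * (spacing + 1) - 1) = -1 by simp,
      PySem.List.pyRange_one_eq_nil (by omega), List.foldl_nil, pvGrid,
      PySem.List.pyRange_one_eq_nil (by omega)]
    simp
  · by_cases hneg : spacing + 1 ≤ 0
    · have hprod : (bitmap.length : Int) * (spacing + 1) ≤ 0 :=
        mul_nonpos_of_nonneg_of_nonpos (by positivity) hneg
      have hsp0 : spacing ≤ 0 := by omega
      rw [show pvGrid ((bitmap.length : Int) * (spacing + 1) - 1) ((bitmap.length : Int) * (spacing + 1) - 1) 0 = [] by
        rw [pvGrid, PySem.List.pyRange_one_eq_nil (by omega)]; simp]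
      simp only [PySem.List.pyRange_one_eq_nil hsp0, List.foldl_nil, PySem.List.foldl_ignore]
      rw [PySem.List.pyRange_one_eq_nil (show (bitmap.length : Int) * (spacing + 1) - 1 ≤ (0 : Int) by omega)]
      simp
    · have hn : 1 ≤ bitmap.length := List.length_pos_of_ne_nil hnil
      have hsp : spacing = (spacing.toNat : Int) := (Int.toNat_of_nonneg (by omega)).symm
      set sN : Nat := spacing.toNat with hsN
      set n : Nat := bitmap.length with hnn
      set N : Nat := n * (sN + 1) - 1 with hNN
      have hN1 : n * (sN + 1) = N + 1 := by
        have : 1 ≤ n * (sN + 1) := Nat.one_le_iff_ne_zero.mpr (by positivity)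
        omega
      have hactual : (bitmap.length : Int) * (spacing + 1) - 1 = (N : Int) := by
        rw [hsp, ← hnn]
        have h1 : ((n * (sN + 1) : Nat) : Int) = ((N + 1 : Nat) : Int) := by exact_mod_cast congrArg (Nat.cast : Nat → Int) hN1
        push_cast at h1 ⊢
        omega
      rw [hactual, hsp]
      rw [phase2Int sN N linecolor N (le_refl N) _ (pvGrid_shape N)]
      obtain ⟨p2S, p2G⟩ := phase2_outer (sN + 1) N linecolor N (le_refl N) _ (pvGrid_shape N)
      obtain ⟨altS, altG⟩ := altB N sN linecolor bitmap
      by_cases hz : sN = 0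
      · simp only [hz, Nat.cast_zero] at p2S p2G altS altG ⊢
        simp only [PySem.List.pyRange_one_eq_nil (le_refl (0 : Int)), List.foldl_nil]
        rw [show (fun (g : List (List Int)) (rc : Int × List Int) => (PySem.List.enumerate rc.2).foldl (fun g cc => g) g) = (fun g _ => g) from funext fun g => funext fun rc => PySem.List.foldl_ignore _ _]
        rw [PySem.List.foldl_ignore]
        refine grid_eq_of_gget p2S altS ?_
        intro a b haN hbN
        rw [p2G a b haN hbN, if_pos haN, pvGrid_gget, altG a b haN hbN]
        simp [pvLineVal, Nat.mod_one]
      · have hsq : ∀ row ∈ bitmap, row.length = n := by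
          rcases hpre with h | h
          · exfalso; omega
          · exact h
        obtain ⟨r3S, r3G⟩ := rrLoop N sN n (by omega) bitmap 0 hsq (by rw [Nat.zero_add, ← hnn]; omega) _ p2S
        rw [Nat.cast_zero] at r3S r3G
        refine grid_eq_of_gget r3S altS ?_
        intro a b haN hbN
        rw [r3G a b haN hbN, altG a b haN hbN, p2G a b haN hbN, if_pos haN, pvGrid_gget]
        have hma := Nat.mod_lt a (show 0 < sN + 1 by omega)
        have hmb := Nat.mod_lt b (show 0 < sN + 1 by omega)
        have hia := mod_succ_iff a sN
        have hib := mod_succ_iff b sN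
        by_cases hline : (a + 1) % (sN + 1) = 0 ∨ (b + 1) % (sN + 1) = 0
        · have hC3 : ¬ ((0 * (sN + 1) ≤ a ∧ a < (0 + bitmap.length) * (sN + 1) ∧ a % (sN + 1) < sN) ∧ b < n * (sN + 1) ∧ b % (sN + 1) < sN) := by
            intro h
            rcases hline with hl | hl
            · have := hia.mp hl; omega
            · have := hib.mp hl; omega
          rw [if_neg hC3, if_pos hline, pvLineVal]
          rcases hline with hl | hl
          · by_cases hb2 : (b + 1) % (sN + 1) = 0
            · rw [if_pos hb2]
            · rw [if_neg hb2, if_pos hl]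
          · rw [if_pos hl]
        · push_neg at hline
          have ha2 : a % (sN + 1) ≠ sN := fun hh => hline.1 (hia.mpr hh)
          have hb2 : b % (sN + 1) ≠ sN := fun hh => hline.2 (hib.mpr hh)
          have hC3 : (0 * (sN + 1) ≤ a ∧ a < (0 + bitmap.length) * (sN + 1) ∧ a % (sN + 1) < sN) ∧ b < n * (sN + 1) ∧ b % (sN + 1) < sN := by
            refine ⟨⟨by omega, ?_, by omega⟩, by omega, by omega⟩
            rw [Nat.zero_add, ← hnn]; omega
          rw [if_pos hC3, if_neg (by intro h; rcases h with h | h; exact hline.1 h; exact hline.2 h), Nat.sub_zero]
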